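-- pv_equiv track=rewrite | github.com/ziyeZzz/python | play-with-algorithm/tree/binary_search.py | my_binary_search
-- ===== SOURCE A (Python) =====
-- def my_binary_search(arr,v):
--     first = 0
--     last = len(arr)-1
--     found = False
--     mid_index = 0
--     while first<=last and not found:
--         # mid_index = (first+last) // 2 -> when the number is very big, this method may cause memory overflow
--         mid_index = first + (last-first)//2
--         if(arr[mid_index]==v):
--             found = True
--         else:
--             if(arr[mid_index]>v):
--                 last = mid_index - 1
--             else:
--                 first = mid_index + 1
--     #find lower and higher bound for duplicate values
--     if(found):
--         lower_bound = mid_index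
--         first_l = mid_index-1#first last
--         while first<=first_l:
--             mid = first + (first_l-first)//2
--             if(arr[mid]==v):
--                 lower_bound = mid
--                 first_l = mid-1
--             else:
--                first = mid + 1
--         higher_bound = mid_index
--         last_s = mid_index+1#last start
--         while last_s<=last:
--             mid = last_s + (last-last_s)//2
--             if(arr[mid]==v):
--                 higher_bound = mid
--                 last_s = mid+1
--             else:
--                 last = mid -1
--         return arr[lower_bound:higher_bound+1]
--     else: return []
-- ===== SOURCE B (Python) =====
-- def my_binary_search(arr, v):
--     # On a sorted array the equal-to-v entries form one contiguous run,
--     # so collecting them in a single pass returns exactly that run.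
--     return [x for x in arr if x == v]
-- ===== Notes on version B (the rewrite author's own statement) =====
-- stated objective: simpler
-- what changed: Replaces A's three-phase binary search (find any match, then binary-search the left and right boundaries, then slice) with a single linear comprehension that collects the elements equal to v, which on a sorted array is exactly the contiguous run A slices out. Pre_ excludes unsorted arrays that contain v, where A's returned run is an artefact of its search path; sorted arrays (the function's stated domain) and all arrays not containing v are covered.
-- outside the precondition, e.g. on my_binary_search([1, 3, 1], 1): A returns [1], B returns [1, 1]
import Mathlib
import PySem

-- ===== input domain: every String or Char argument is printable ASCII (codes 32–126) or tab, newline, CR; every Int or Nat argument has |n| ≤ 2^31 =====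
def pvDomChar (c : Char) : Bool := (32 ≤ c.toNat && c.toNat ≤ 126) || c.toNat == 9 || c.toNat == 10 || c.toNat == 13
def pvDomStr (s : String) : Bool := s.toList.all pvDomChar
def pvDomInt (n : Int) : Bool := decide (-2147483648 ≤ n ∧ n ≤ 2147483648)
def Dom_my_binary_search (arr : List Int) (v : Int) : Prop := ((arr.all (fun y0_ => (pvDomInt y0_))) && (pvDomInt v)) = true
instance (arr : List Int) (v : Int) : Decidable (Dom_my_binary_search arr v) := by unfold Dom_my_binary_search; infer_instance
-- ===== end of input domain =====

-- B replaces A's three binary-search loops by a single linear pass collecting the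
-- elements equal to v (on a sorted array that is exactly the run A slices out): simpler, not faster.

-- ===== PORT A =====

-- Python's `lo + (hi-lo)//2` midpoint.
def pvMid (a b : Int) : Int := a + PySem.Int.floordiv (b - a) 2

-- cited by the ports' decreasing_by
theorem pvMid_bounds (a b : Int) (h : a ≤ b) : a ≤ pvMid a b ∧ pvMid a b ≤ b := by
  unfold pvMid
  rw [PySem.Int.floordiv_eq_ediv_of_pos (by norm_num)]
  omega

-- arr[i]: the loops keep every index in range, so the default of pyGet? is never used.
def pvAGet (arr : List Int) (i : Int) : Int := (PySem.List.pyGet? arr i).getD 0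

-- A's first while loop: returns (first, last, mid_index, found).
def bsMain (arr : List Int) (v : Int) (first last : Int) : Int × Int × Int × Bool :=
  if h : first ≤ last then
    let mid := pvMid first last
    if pvAGet arr mid = v then (first, last, mid, true)
    else if pvAGet arr mid > v then bsMain arr v first (mid - 1)
    else bsMain arr v (mid + 1) last
  else (first, last, 0, false)
termination_by (last + 1 - first).toNat
decreasing_by
  · have := pvMid_bounds first last h; omega
  · have := pvMid_bounds first last h; omega

-- A's lower-bound while loop.
def bsLeft (arr : List Int) (v : Int) (first first_l lower_bound : Int) : Int :=
  if h : first ≤ first_l then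
    let mid := pvMid first first_l
    if pvAGet arr mid = v then bsLeft arr v first (mid - 1) mid
    else bsLeft arr v (mid + 1) first_l lower_bound
  else lower_bound
termination_by (first_l + 1 - first).toNat
decreasing_by
  · have := pvMid_bounds first first_l h; omega
  · have := pvMid_bounds first first_l h; omega

-- A's higher-bound while loop.
def bsRight (arr : List Int) (v : Int) (last_s last higher_bound : Int) : Int :=
  if h : last_s ≤ last then
    let mid := pvMid last_s last
    if pvAGet arr mid = v then bsRight arr v (mid + 1) last mid
    else bsRight arr v last_s (mid - 1) higher_bound
  else higher_bound
termination_by (last + 1 - last_s).toNat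
decreasing_by
  · have := pvMid_bounds last_s last h; omega
  · have := pvMid_bounds last_s last h; omega

def my_binary_search (arr : List Int) (v : Int) : List Int :=
  match bsMain arr v 0 ((arr.length : Int) - 1) with
  | (first, last, mid_index, found) =>
    if found then
      let lower_bound := bsLeft arr v first (mid_index - 1) mid_index
      let higher_bound := bsRight arr v (mid_index + 1) last mid_index
      PySem.List.slice arr (some lower_bound) (some (higher_bound + 1))
    else []

-- ===== PORT B =====
def my_binary_search_alt (arr : List Int) (v : Int) : List Int :=
  arr.filter (fun x => x == v)

-- ===== PRECONDITION & SPEC =====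
-- Pre_ excludes unsorted arrays that contain v (binary search's stated domain is a sorted
-- array; on an unsorted one A's value is an artefact of its search path, nothing is claimed there).
def Pre_my_binary_search (arr : List Int) (v : Int) : Prop := List.Pairwise (· ≤ ·) arr ∨ v ∉ arr
instance (arr : List Int) (v : Int) : Decidable (Pre_my_binary_search arr v) := by unfold Pre_my_binary_search; infer_instance
def pvWitness_my_binary_search : List Int × Int := ([1, 2, 2, 3], 2)

def Spec_my_binary_search (arr : List Int) (v : Int) (out : List Int) : Prop := out = my_binary_search_alt arr v
instance (arr : List Int) (v : Int) (out : List Int) : Decidable (Spec_my_binary_search arr v out) := by unfold Spec_my_binary_search; infer_instance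

-- ===== CLAIM (what is proved, stated in full; the proofs are below) =====
def Claim_equal_my_binary_search : Prop := ∀ (arr : List Int) (v : Int), Dom_my_binary_search arr v → Pre_my_binary_search arr v → Spec_my_binary_search arr v (my_binary_search arr v)

-- ===== LEMMAS AND PROOFS =====

theorem pvAGet_eq_getElem (arr : List Int) (i : Int) (h0 : 0 ≤ i) (h1 : i < (arr.length : Int)) :
    pvAGet arr i = arr[i.toNat]'(by omega) := by
  unfold pvAGet
  rw [PySem.List.pyGet?_eq_some_getElem arr h0 h1]
  rfl

theorem pvMono (arr : List Int) (hs : List.Pairwise (· ≤ ·) arr) (i j : Int)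
    (h0 : 0 ≤ i) (hij : i ≤ j) (hj : j < (arr.length : Int)) :
    pvAGet arr i ≤ pvAGet arr j := by
  rw [pvAGet_eq_getElem arr i h0 (by omega), pvAGet_eq_getElem arr j (by omega) hj]
  rcases eq_or_lt_of_le hij with h | h
  · simp [h]
  · exact List.pairwise_iff_getElem.1 hs i.toNat j.toNat (by omega) (by omega) (by omega)


theorem bsMain_correct (arr : List Int) (v : Int) (hs : List.Pairwise (· ≤ ·) arr)
    (first last : Int) : 0 ≤ first → last < (arr.length : Int) →
    (∀ i : Int, 0 ≤ i → i < (arr.length : Int) → pvAGet arr i = v → first ≤ i ∧ i ≤ last) →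
    (match bsMain arr v first last with
     | (f, l, m, fd) =>
       if fd then
         0 ≤ f ∧ l < (arr.length : Int) ∧ f ≤ m ∧ m ≤ l ∧ pvAGet arr m = v ∧
           (∀ i : Int, 0 ≤ i → i < (arr.length : Int) → pvAGet arr i = v → f ≤ i ∧ i ≤ l)
       else ∀ i : Int, 0 ≤ i → i < (arr.length : Int) → pvAGet arr i ≠ v) := by
  fun_induction bsMain arr v first last with
  | case1 first last h mid hfound =>
    intro h0 h1 hocc
    have hm := pvMid_bounds first last h
    exact ⟨h0, h1, hm.1, hm.2, hfound, hocc⟩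
  | case2 first last h mid hne hgt ih =>
    intro h0 h1 hocc
    have hm := pvMid_bounds first last h
    apply ih h0 (by omega)
    intro i hi0 hin hiv
    have h2 := hocc i hi0 hin hiv
    have h3 : ¬ mid ≤ i := fun hmi => by
      have hmono := pvMono arr hs mid i (by omega) hmi hin
      rw [hiv] at hmono; omega
    omega
  | case3 first last h mid hne hngt ih =>
    intro h0 h1 hocc
    have hm := pvMid_bounds first last h
    apply ih (by omega) h1
    intro i hi0 hin hiv
    have h2 := hocc i hi0 hin hiv
    have h3 : ¬ i ≤ mid := fun hmi => by
      have hmono := pvMono arr hs i mid hi0 hmi (by omega)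
      rw [hiv] at hmono; omega
    omega
  | case4 first last h =>
    intro h0 h1 hocc i hi0 hin hiv
    have := hocc i hi0 hin hiv
    omega

theorem bsLeft_correct (arr : List Int) (v : Int) (hs : List.Pairwise (· ≤ ·) arr)
    (first first_l lb : Int) : 0 ≤ first → first_l = lb - 1 →
    0 ≤ lb → lb < (arr.length : Int) → pvAGet arr lb = v →
    (∀ i : Int, 0 ≤ i → i < (arr.length : Int) → pvAGet arr i = v → first ≤ i) →
    (0 ≤ bsLeft arr v first first_l lb ∧ bsLeft arr v first first_l lb < (arr.length : Int) ∧
     pvAGet arr (bsLeft arr v first first_l lb) = v ∧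
       (∀ i : Int, 0 ≤ i → i < (arr.length : Int) → pvAGet arr i = v → bsLeft arr v first first_l lb ≤ i)) := by
  fun_induction bsLeft arr v first first_l lb with
  | case1 first first_l lb h mid hfound ih =>
    intro h0 hrel hlb0 hlbn hlbv hocc
    have hm := pvMid_bounds first first_l h
    exact ih h0 rfl (by omega) (by omega) hfound hocc
  | case2 first first_l lb h mid hne ih =>
    intro h0 hrel hlb0 hlbn hlbv hocc
    have hm := pvMid_bounds first first_l h
    apply ih (by omega) hrel hlb0 hlbn hlbv
    intro i hi0 hin hiv
    have h2 := hocc i hi0 hin hiv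
    have h3 : ¬ i ≤ mid := fun hile => by
      have m1 := pvMono arr hs i mid hi0 hile (by omega)
      have m2 := pvMono arr hs mid lb (by omega) (by omega) hlbn
      rw [hiv] at m1; rw [hlbv] at m2; omega
    omega
  | case3 first first_l lb h =>
    intro h0 hrel hlb0 hlbn hlbv hocc
    refine ⟨hlb0, hlbn, hlbv, fun i hi0 hin hiv => ?_⟩
    have := hocc i hi0 hin hiv
    omega

theorem bsRight_correct (arr : List Int) (v : Int) (hs : List.Pairwise (· ≤ ·) arr)
    (last_s last hb : Int) : last < (arr.length : Int) → last_s = hb + 1 →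
    0 ≤ hb → hb < (arr.length : Int) → pvAGet arr hb = v →
    (∀ i : Int, 0 ≤ i → i < (arr.length : Int) → pvAGet arr i = v → i ≤ last) →
    (0 ≤ bsRight arr v last_s last hb ∧ bsRight arr v last_s last hb < (arr.length : Int) ∧
     pvAGet arr (bsRight arr v last_s last hb) = v ∧
       (∀ i : Int, 0 ≤ i → i < (arr.length : Int) → pvAGet arr i = v → i ≤ bsRight arr v last_s last hb)) := by
  fun_induction bsRight arr v last_s last hb with
  | case1 last_s last hb h mid hfound ih =>
    intro h1 hrel hhb0 hhbn hhbv hocc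
    have hm := pvMid_bounds last_s last h
    exact ih h1 rfl (by omega) (by omega) hfound hocc
  | case2 last_s last hb h mid hne ih =>
    intro h1 hrel hhb0 hhbn hhbv hocc
    have hm := pvMid_bounds last_s last h
    apply ih (by omega) hrel hhb0 hhbn hhbv
    intro i hi0 hin hiv
    have h2 := hocc i hi0 hin hiv
    have h3 : ¬ mid ≤ i := fun hile => by
      have m1 := pvMono arr hs hb mid hhb0 (by omega) (by omega)
      have m2 := pvMono arr hs mid i (by omega) hile hin
      rw [hiv] at m2; rw [hhbv] at m1; omega
    omega
  | case3 last_s last hb h =>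
    intro h1 hrel hhb0 hhbn hhbv hocc
    refine ⟨hhb0, hhbn, hhbv, fun i hi0 hin hiv => ?_⟩
    have := hocc i hi0 hin hiv
    omega

theorem pvAGet_nat (arr : List Int) (i : Nat) (h : i < arr.length) : pvAGet arr (i : Int) = arr[i] := by
  rw [pvAGet_eq_getElem arr (i : Int) (by omega) (by exact_mod_cast h)]
  simp

theorem bsMain_not_found (arr : List Int) (v : Int) (first last : Int) :
    0 ≤ first → last < (arr.length : Int) → v ∉ arr →
    (bsMain arr v first last).2.2.2 = false := by
  fun_induction bsMain arr v first last with
  | case1 first last h mid hfound =>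
    intro h0 h1 hv
    exfalso
    have hm := pvMid_bounds first last h
    rw [pvAGet_eq_getElem arr mid (by omega) (by omega)] at hfound
    exact hv (hfound ▸ List.getElem_mem _)
  | case2 first last h mid hne hgt ih =>
    intro h0 h1 hv
    have hm := pvMid_bounds first last h
    exact ih h0 (by omega) hv
  | case3 first last h mid hne hngt ih =>
    intro h0 h1 hv
    have hm := pvMid_bounds first last h
    exact ih (by omega) h1 hv
  | case4 first last h => intro _ _ _; rfl

theorem filter_eq_nil_of_no_occ (arr : List Int) (v : Int)
    (h : ∀ i : Int, 0 ≤ i → i < (arr.length : Int) → pvAGet arr i ≠ v) :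
    arr.filter (fun x => x == v) = [] := by
  rw [List.filter_eq_nil_iff]
  intro x hx
  obtain ⟨i, hi, rfl⟩ := List.mem_iff_getElem.1 hx
  simp only [beq_iff_eq]
  intro he
  exact h (i : Int) (by omega) (by exact_mod_cast hi) (by rw [pvAGet_nat arr i hi]; exact he)

theorem slice_eq_filter (arr : List Int) (v : Int) (hs : List.Pairwise (· ≤ ·) arr)
    (lb hb : Int) (h0 : 0 ≤ lb) (hle : lb ≤ hb) (hn : hb < (arr.length : Int))
    (hlb : pvAGet arr lb = v) (hhb : pvAGet arr hb = v)
    (hleast : ∀ i : Int, 0 ≤ i → i < (arr.length : Int) → pvAGet arr i = v → lb ≤ i)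
    (hgreatest : ∀ i : Int, 0 ≤ i → i < (arr.length : Int) → pvAGet arr i = v → i ≤ hb) :
    PySem.List.slice arr (some lb) (some (hb + 1)) = arr.filter (fun x => x == v) := by
  obtain ⟨a, rfl⟩ : ∃ a : Nat, lb = (a : Int) := ⟨lb.toNat, (Int.toNat_of_nonneg h0).symm⟩
  obtain ⟨b, rfl⟩ : ∃ b : Nat, hb = (b : Int) := ⟨hb.toNat, (Int.toNat_of_nonneg (by omega)).symm⟩
  have hab : a ≤ b := by exact_mod_cast hle
  have hbn : b < arr.length := by exact_mod_cast hn
  have hA : arr[a]'(by omega) = v := by rw [← pvAGet_nat arr a (by omega)]; exact hlb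
  have hB : arr[b]'hbn = v := by rw [← pvAGet_nat arr b hbn]; exact hhb
  have hleastN : ∀ i : Nat, (hi : i < arr.length) → arr[i] = v → a ≤ i := by
    intro i hi hv
    have := hleast (i : Int) (by omega) (by exact_mod_cast hi) (by rw [pvAGet_nat arr i hi]; exact hv)
    exact_mod_cast this
  have hgreatestN : ∀ i : Nat, (hi : i < arr.length) → arr[i] = v → i ≤ b := by
    intro i hi hv
    have := hgreatest (i : Int) (by omega) (by exact_mod_cast hi) (by rw [pvAGet_nat arr i hi]; exact hv)
    exact_mod_cast this
  have monoN : ∀ i j : Nat, (hij : i ≤ j) → (hj : j < arr.length) → arr[i]'(Nat.lt_of_le_of_lt hij hj) ≤ arr[j] := by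
    intro i j hij hj
    rcases Nat.eq_or_lt_of_le hij with rfl | hlt
    · exact le_rfl
    · exact List.pairwise_iff_getElem.1 hs i j (by omega) hj hlt
  have hcast : ((b : Int) + 1) = (((b + 1 : Nat)) : Int) := by push_cast; ring
  rw [hcast, PySem.List.slice_natCast]
  conv_rhs => rw [← List.take_append_drop a arr]
  rw [List.filter_append]
  have h1 : (arr.take a).filter (fun x => x == v) = [] := by
    rw [List.filter_eq_nil_iff]
    intro x hx
    obtain ⟨i, hi, rfl⟩ := List.mem_iff_getElem.1 hx
    have hia : i < a := by simp at hi; omega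
    simp only [List.getElem_take, beq_iff_eq]
    intro he
    have := hleastN i (by omega) he
    omega
  rw [h1, List.nil_append]
  conv_rhs => rw [← List.take_append_drop (b + 1 - a) (arr.drop a)]
  rw [List.filter_append]
  have h2 : ((arr.drop a).take (b + 1 - a)).filter (fun x => x == v)
      = (arr.drop a).take (b + 1 - a) := by
    rw [List.filter_eq_self]
    intro x hx
    obtain ⟨j, hj, rfl⟩ := List.mem_iff_getElem.1 hx
    have hjb : a + j ≤ b ∧ a + j < arr.length := by simp at hj; omega
    simp only [List.getElem_take, List.getElem_drop, beq_iff_eq]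
    have m1 : arr[a]'(by omega) ≤ arr[a + j]'(by omega) := monoN a (a + j) (by omega) (by omega)
    have m2 : arr[a + j]'(by omega) ≤ arr[b]'hbn := monoN (a + j) b (by omega) hbn
    omega
  rw [h2]
  have h3 : ((arr.drop a).drop (b + 1 - a)).filter (fun x => x == v) = [] := by
    rw [List.drop_drop]
    have hd : a + (b + 1 - a) = b + 1 := by omega
    rw [hd, List.filter_eq_nil_iff]
    intro x hx
    obtain ⟨j, hj, rfl⟩ := List.mem_iff_getElem.1 hx
    have hjn : b + 1 + j < arr.length := by simp at hj; omega
    simp only [List.getElem_drop, beq_iff_eq]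
    intro he
    have := hgreatestN (b + 1 + j) hjn he
    omega
  rw [h3, List.append_nil]

-- ===== VERDICT (by name: the statement is the Claim_ definition above) =====
theorem my_binary_search_spec : Claim_equal_my_binary_search := by
  intro arr v _hdom hpre
  unfold Spec_my_binary_search my_binary_search my_binary_search_alt
  rcases hpre with hsort | hv
  case inr =>
    have hnf := bsMain_not_found arr v 0 ((arr.length : Int) - 1) le_rfl (by omega) hv
    rcases hres : bsMain arr v 0 ((arr.length : Int) - 1) with ⟨f, l, m, fd⟩
    rw [hres] at hnf
    cases fd with
    | true => exact absurd hnf (by simp)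
    | false =>
      simp only [if_neg Bool.false_ne_true]
      symm
      rw [List.filter_eq_nil_iff]
      intro x hx
      simp only [beq_iff_eq]
      exact fun he => hv (he ▸ hx)
  case inl =>
  have hmain := bsMain_correct arr v hsort 0 ((arr.length : Int) - 1) le_rfl (by omega)
    (fun i h0 h1 _ => by omega)
  rcases hres : bsMain arr v 0 ((arr.length : Int) - 1) with ⟨f, l, m, fd⟩
  rw [hres] at hmain
  cases fd with
  | false =>
    simp only [if_neg Bool.false_ne_true]
    exact (filter_eq_nil_of_no_occ arr v hmain).symm
  | true =>
    simp only []
    obtain ⟨hf0, hln, hfm, hml, hmv, hocc⟩ := hmain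
    have hL := bsLeft_correct arr v hsort f (m - 1) m hf0 rfl (by omega) (by omega) hmv
      (fun i a b c => (hocc i a b c).1)
    have hR := bsRight_correct arr v hsort (m + 1) l m hln rfl (by omega) (by omega) hmv
      (fun i a b c => (hocc i a b c).2)
    obtain ⟨hl0, hln', hlv, hleast⟩ := hL
    obtain ⟨hr0, hrn, hrv, hgreatest⟩ := hR
    exact slice_eq_filter arr v hsort _ _ hl0
      (hleast _ hr0 hrn hrv) hrn hlv hrv hleast hgreatest
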